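-- pv_equiv track=rewrite | github.com/lenarother/advent-of-code | adventofcode_2021/day_13/solution.py | get_dots_after_folding
-- ===== SOURCE A (Python) =====
-- def get_value_after_fold(val, fold_val):
--     if val < fold_val:
--         return val
--     return fold_val - (val - fold_val)
--
-- def fold_along_x(dot, val):
--     x, y = dot
--     new_x = get_value_after_fold(x, val)
--     return new_x, y
--
-- def fold_along_y(dot, val):
--     x, y = dot
--     new_y = get_value_after_fold(y, val)
--     return x, new_y
--
-- def get_dots_after_folding(dots, folds):
--     fold_functions = {
--         'x': fold_along_x,
--         'y': fold_along_y,
--     }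
--
--     # todo: use reduce
--     for fold in folds:
--         new_dots = set()
--         fold_function = fold_functions[fold[0]]
--         fold_value = fold[1]
--         for dot in dots:
--             new_dots.add(fold_function(dot, fold_value))
--         dots = new_dots
--
--     return dots
-- ===== SOURCE B (Python) =====
-- def get_dots_after_folding(dots, folds):
--     result = set()
--     for x, y in dots:
--         for axis, v in folds:
--             if axis == 'x':
--                 x = x if x < v else 2 * v - x
--             elif axis == 'y':
--                 y = y if y < v else 2 * v - y
--             else:
--                 raise KeyError(axis)
--         result.add((x, y))
--     return result
-- ===== Notes on version B (the rewrite author's own statement) =====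
-- stated objective: alternative
-- what changed: Loop nesting inverted: instead of rebuilding an intermediate set after every fold, each dot is pushed through the whole fold sequence in one inner loop and deduplication happens once in the final result set.
import Mathlib
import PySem

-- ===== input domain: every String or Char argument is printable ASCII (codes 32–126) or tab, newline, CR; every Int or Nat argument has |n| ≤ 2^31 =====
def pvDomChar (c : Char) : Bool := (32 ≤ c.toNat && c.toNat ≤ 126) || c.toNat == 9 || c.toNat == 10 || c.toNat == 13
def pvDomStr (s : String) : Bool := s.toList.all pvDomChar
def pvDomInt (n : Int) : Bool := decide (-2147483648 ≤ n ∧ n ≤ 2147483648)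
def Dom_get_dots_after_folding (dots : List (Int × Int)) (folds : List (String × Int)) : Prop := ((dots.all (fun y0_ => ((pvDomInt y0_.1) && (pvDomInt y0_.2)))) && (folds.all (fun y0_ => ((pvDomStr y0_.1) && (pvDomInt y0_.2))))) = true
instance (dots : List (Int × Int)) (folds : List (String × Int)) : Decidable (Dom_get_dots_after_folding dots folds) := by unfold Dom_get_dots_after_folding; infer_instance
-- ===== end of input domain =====

-- B inverts the loop nesting: each dot is run through the whole fold sequence, dedup once at the end (alternative decomposition, same cost).


-- ===== PORT A =====
def pvGetValueAfterFold (val fold_val : Int) : Int :=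
  if val < fold_val then val else fold_val - (val - fold_val)

def pvFoldAlongX (dot : Int × Int) (val : Int) : Int × Int :=
  (pvGetValueAfterFold dot.1 val, dot.2)

def pvFoldAlongY (dot : Int × Int) (val : Int) : Int × Int :=
  (dot.1, pvGetValueAfterFold dot.2 val)

def pvFoldFunctions : PySem.Dict String ((Int × Int) → Int → (Int × Int)) :=
  PySem.Dict.ofList [("x", pvFoldAlongX), ("y", pvFoldAlongY)]

-- one iteration of A's outer loop (the dict lookup; none = Python's KeyError, excluded by Pre_)
def pvAStep (ds : List (Int × Int)) (fold : String × Int) : List (Int × Int) :=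
  match PySem.Dict.get? pvFoldFunctions fold.1 with
  | some fold_function =>
      ds.foldl (fun new_dots dot => PySem.Set.add new_dots (fold_function dot fold.2)) PySem.Set.empty
  | none => ds

def get_dots_after_folding (dots : List (Int × Int)) (folds : List (String × Int)) : List (Int × Int) :=
  folds.foldl pvAStep dots

-- ===== PORT B =====
def pvApplyFolds (folds : List (String × Int)) (dot : Int × Int) : Int × Int :=
  folds.foldl (fun p f =>
    if f.1 = "x" then (if p.1 < f.2 then p.1 else 2 * f.2 - p.1, p.2)
    else if f.1 = "y" then (p.1, if p.2 < f.2 then p.2 else 2 * f.2 - p.2)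
    else p) dot   -- the Python raises KeyError(axis) here; excluded by Pre_

def get_dots_after_folding_alt (dots : List (Int × Int)) (folds : List (String × Int)) : List (Int × Int) :=
  dots.foldl (fun result dot => PySem.Set.add result (pvApplyFolds folds dot)) PySem.Set.empty

-- ===== PRECONDITION & SPEC =====
-- Pre_ excludes folds with an axis other than "x"/"y", on which both Pythons raise KeyError.
-- The second clause records that dots models a Python set (duplicate-free), needed only when
-- folds = [] and A returns dots itself unchanged; it excludes no representable input.
def Pre_get_dots_after_folding (dots : List (Int × Int)) (folds : List (String × Int)) : Prop :=
  (∀ f ∈ folds, f.1 = "x" ∨ f.1 = "y") ∧ (folds = [] → dots.Nodup)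
instance (dots : List (Int × Int)) (folds : List (String × Int)) : Decidable (Pre_get_dots_after_folding dots folds) := by unfold Pre_get_dots_after_folding; infer_instance

def pvWitness_get_dots_after_folding : (List (Int × Int)) × (List (String × Int)) :=
  ([(0, 5), (3, 1), (7, 5)], [("x", 4), ("y", 3)])

def Spec_get_dots_after_folding (dots : List (Int × Int)) (folds : List (String × Int)) (out : List (Int × Int)) : Prop := out = get_dots_after_folding_alt dots folds
instance (dots : List (Int × Int)) (folds : List (String × Int)) (out : List (Int × Int)) : Decidable (Spec_get_dots_after_folding dots folds out) := by unfold Spec_get_dots_after_folding; infer_instance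

-- ===== CLAIM (what is proved, stated in full; the proofs are below) =====
def Claim_equal_get_dots_after_folding : Prop := ∀ (dots : List (Int × Int)) (folds : List (String × Int)), Dom_get_dots_after_folding dots folds → Pre_get_dots_after_folding dots folds → Spec_get_dots_after_folding dots folds (get_dots_after_folding dots folds)

-- ===== LEMMAS AND PROOFS =====

-- dedup (first occurrences) commutes with mapping: deduping first cannot change which
-- occurrence of each image value comes first.
theorem pv_ofList_map_ofList {α β : Type} [BEq α] [LawfulBEq α] [BEq β] [LawfulBEq β]
    (g : α → β) (l : List α) :
    PySem.Set.ofList ((PySem.Set.ofList l).map g) = PySem.Set.ofList (l.map g) := by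
  induction l using List.reverseRecOn with
  | nil => rfl
  | append_singleton xs x ih =>
      rw [PySem.Set.ofList_append_singleton]
      by_cases hx : x ∈ PySem.Set.ofList xs
      · rw [PySem.Set.add_of_mem hx, ih, List.map_append, List.map_singleton,
          PySem.Set.ofList_append_singleton,
          PySem.Set.add_of_mem (by
            rw [PySem.Set.mem_ofList]
            exact List.mem_map_of_mem ((PySem.Set.mem_ofList _ _).1 hx))]
      · rw [PySem.Set.add_of_not_mem hx, List.map_append, List.map_singleton,
          PySem.Set.ofList_append_singleton, ih, List.map_append, List.map_singleton,
          PySem.Set.ofList_append_singleton]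

-- one pass of A's inner loop builds set(map f ds)
theorem pv_inner_loop (f : (Int × Int) → (Int × Int)) (ds : List (Int × Int)) :
    ds.foldl (fun nd d => PySem.Set.add nd (f d)) PySem.Set.empty
      = PySem.Set.ofList (ds.map f) := by
  rw [← PySem.Set.update_map_eq_foldl_add]
  exact PySem.Set.update_nil_left _

-- B's reflection rule 2v-x is A's v-(x-v)
theorem pv_reflect_eq (v fv : Int) :
    (if v < fv then v else 2 * fv - v) = pvGetValueAfterFold v fv := by
  unfold pvGetValueAfterFold; split_ifs <;> omega

-- B's per-fold step agrees with A's dict-selected fold function when the axis is "x" or "y"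
theorem pv_step_eq (p : Int × Int) (f : String × Int) (h : f.1 = "x" ∨ f.1 = "y") :
    (if f.1 = "x" then (if p.1 < f.2 then p.1 else 2 * f.2 - p.1, p.2)
     else if f.1 = "y" then (p.1, if p.2 < f.2 then p.2 else 2 * f.2 - p.2)
     else p)
      = (if f.1 = "x" then pvFoldAlongX else pvFoldAlongY) p f.2 := by
  rcases h with h | h <;> simp [h, pvFoldAlongX, pvFoldAlongY, pv_reflect_eq]

-- the dict lookup in pvAStep, resolved under Pre_
theorem pv_astep_eq (ds : List (Int × Int)) (f : String × Int) (h : f.1 = "x" ∨ f.1 = "y") :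
    pvAStep ds f = ds.foldl
      (fun nd d => PySem.Set.add nd ((if f.1 = "x" then pvFoldAlongX else pvFoldAlongY) d f.2))
      PySem.Set.empty := by
  rcases h with h | h <;> rw [pvAStep, h] <;> rfl

-- A's outer loop applied to a deduped list equals set of the fully-folded list
-- the composed B step threads through A's chosen fold function
theorem pv_compose_eq (f : String × Int) (fs : List (String × Int)) (hf : f.1 = "x" ∨ f.1 = "y")
    (d : Int × Int) :
    pvApplyFolds fs ((if f.1 = "x" then pvFoldAlongX else pvFoldAlongY) d f.2)
      = pvApplyFolds (f :: fs) d := by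
  unfold pvApplyFolds
  simp only [List.foldl_cons]
  congr 1
  exact (pv_step_eq d f hf).symm

-- A's outer loop applied to a deduped list equals set of the fully-folded list
theorem pv_main (folds : List (String × Int)) :
    ∀ l : List (Int × Int), (∀ f ∈ folds, f.1 = "x" ∨ f.1 = "y") →
    folds.foldl pvAStep (PySem.Set.ofList l)
      = PySem.Set.ofList (l.map (pvApplyFolds folds)) := by
  induction folds with
  | nil =>
      intro l _
      rw [List.foldl_nil, show l.map (pvApplyFolds []) = l.map id from rfl, List.map_id]
  | cons f fs ih =>
      intro l hax
      have hf := hax f List.mem_cons_self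
      rw [List.foldl_cons, pv_astep_eq _ f hf,
        pv_inner_loop (fun d => (if f.1 = "x" then pvFoldAlongX else pvFoldAlongY) d f.2),
        pv_ofList_map_ofList, ih _ (fun g hg => hax g (List.mem_cons_of_mem f hg)), List.map_map]
      congr 1
      exact List.map_congr_left (fun d _ => pv_compose_eq f fs hf d)

-- ===== VERDICT (by name: the statement is the Claim_ definition above) =====
theorem get_dots_after_folding_spec : Claim_equal_get_dots_after_folding := by
  intro dots folds _ hpre
  obtain ⟨hax, hnil⟩ := hpre
  unfold Spec_get_dots_after_folding get_dots_after_folding get_dots_after_folding_alt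
  have hb : dots.foldl (fun result dot => PySem.Set.add result (pvApplyFolds folds dot)) PySem.Set.empty
      = PySem.Set.ofList (dots.map (pvApplyFolds folds)) := pv_inner_loop _ dots
  rw [hb]
  cases folds with
  | nil =>
      rw [List.foldl_nil, show dots.map (pvApplyFolds []) = dots.map id from rfl, List.map_id]
      exact (PySem.Set.ofList_eq_self_of_nodup dots (hnil rfl)).symm
  | cons f fs =>
      have hf := hax f List.mem_cons_self
      rw [List.foldl_cons, pv_astep_eq _ f hf,
        pv_inner_loop (fun d => (if f.1 = "x" then pvFoldAlongX else pvFoldAlongY) d f.2),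
        pv_main fs _ (fun g hg => hax g (List.mem_cons_of_mem f hg)), List.map_map]
      congr 1
      exact List.map_congr_left (fun d _ => pv_compose_eq f fs hf d)
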